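-- pv_equiv track=rewrite | github.com/pcabido/aptkit | src/util/aptutil.py | getLongDesc
-- ===== SOURCE A (Python) =====
-- def getLongDesc(desc):
--     """
--     From the description, returns the long description.
--     """
--     final = ""
--     if desc:
--         try:
--             tmpDesc = desc.split("\n")
--             if len(tmpDesc) > 1:
--                 for i in range(len(tmpDesc) - 1):
--                     final += tmpDesc[i+1] + "\n"
--             return final
--         except:
--             return ""
--     else:
--         return ""
-- ===== SOURCE B (Python) =====
-- def getLongDesc(desc):
--     """
--     From the description, returns the long description.
--     """
--     if not desc:
--         return ""
--     try:
--         pos = desc.find("\n")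
--         if pos == -1:
--             return ""
--         return desc[pos + 1:] + "\n"
--     except:
--         return ""
-- ===== Notes on version B (the rewrite author's own statement) =====
-- stated objective: simpler
-- what changed: Instead of splitting the string into a list of lines and looping over indices to re-concatenate every line after the first with a newline appended, B locates the first newline with find and returns the slice after it plus one trailing newline.
import Mathlib
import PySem

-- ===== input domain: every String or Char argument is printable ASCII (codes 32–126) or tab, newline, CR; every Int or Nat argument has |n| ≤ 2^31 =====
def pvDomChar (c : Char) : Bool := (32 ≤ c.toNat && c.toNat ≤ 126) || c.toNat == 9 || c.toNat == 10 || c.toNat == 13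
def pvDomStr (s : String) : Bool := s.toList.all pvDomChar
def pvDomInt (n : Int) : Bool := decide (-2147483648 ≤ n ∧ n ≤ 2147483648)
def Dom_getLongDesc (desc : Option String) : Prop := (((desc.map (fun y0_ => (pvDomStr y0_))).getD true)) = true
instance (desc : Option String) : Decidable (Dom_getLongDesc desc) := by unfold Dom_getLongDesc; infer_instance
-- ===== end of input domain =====

-- B replaces split-into-lines plus an index loop by a single find of the first newline and a tail slice (objective: simpler).

-- ===== PORT A =====
-- A, step for step (on the code points; the try can never raise on a string):
-- final = ""; if desc: tmp = desc.split("\n"); if len(tmp) > 1: for i in range(len(tmp)-1): final += tmp[i+1] + "\n"; return final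
def getLongDesc (desc : Option String) : String :=
  match desc with
  | none => ""
  | some s =>
      if s.toList ≠ [] then
        let tmp := PySem.Chars.splitOn s.toList ['\n']
        let final :=
          if tmp.length > 1 then
            (PySem.List.pyRange 0 ((tmp.length : Int) - 1) 1).foldl
              (fun acc i => acc ++ PySem.List.pyGetD tmp (i + 1) [] ++ ['\n']) []
          else []
        String.ofList final
      else ""

-- ===== PORT B =====
-- B: if not desc: return ""; pos = desc.find("\n"); if pos == -1: return ""; return desc[pos+1:] + "\n"
def getLongDesc_alt (desc : Option String) : String :=
  match desc with
  | none => ""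
  | some s =>
      if s.toList ≠ [] then
        let pos := PySem.Chars.find s.toList ['\n']
        if pos = -1 then ""
        else String.ofList (PySem.Chars.slice s.toList (some (pos + 1)) none ++ ['\n'])
      else ""

-- ===== PRECONDITION & SPEC =====
def Spec_getLongDesc (desc : Option String) (out : String) : Prop := out = getLongDesc_alt desc
instance (desc : Option String) (out : String) : Decidable (Spec_getLongDesc desc out) := by unfold Spec_getLongDesc; infer_instance

-- ===== CLAIM (what is proved, stated in full; the proofs are below) =====
def Claim_equal_getLongDesc : Prop := ∀ (desc : Option String), Dom_getLongDesc desc → Spec_getLongDesc desc (getLongDesc desc)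

-- ===== LEMMAS AND PROOFS =====

theorem pv_go_acc (fuel : Nat) : ∀ (l cur : List Char) (acc : List (List Char)),
    PySem.Chars.splitOn.go ['\n'] fuel l cur acc
      = acc.reverse ++ (cur.reverse ++ (PySem.Chars.splitOn.go ['\n'] fuel l [] []).headD [])
          :: (PySem.Chars.splitOn.go ['\n'] fuel l [] []).tail := by
  induction fuel with
  | zero => intro l cur acc; simp [PySem.Chars.splitOn.go]
  | succ n ih =>
    intro l cur acc
    cases l with
    | nil => simp [PySem.Chars.splitOn.go]
    | cons c rest =>
      by_cases hc : c = '\n'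
      · subst hc
        rw [show PySem.Chars.splitOn.go ['\n'] (n+1) ('\n'::rest) cur acc
              = PySem.Chars.splitOn.go ['\n'] n rest [] (cur.reverse :: acc) by
            simp [PySem.Chars.splitOn.go, List.isPrefixOf]]
        rw [show PySem.Chars.splitOn.go ['\n'] (n+1) ('\n'::rest) [] []
              = PySem.Chars.splitOn.go ['\n'] n rest [] [[]] by
            simp [PySem.Chars.splitOn.go, List.isPrefixOf]]
        rw [ih rest [] (cur.reverse :: acc), ih rest [] [[]]]
        simp
      · rw [show PySem.Chars.splitOn.go ['\n'] (n+1) (c::rest) cur acc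
              = PySem.Chars.splitOn.go ['\n'] n rest (c :: cur) acc by
            simp [PySem.Chars.splitOn.go, List.isPrefixOf]
            exact fun h => absurd h.symm hc]
        rw [show PySem.Chars.splitOn.go ['\n'] (n+1) (c::rest) [] []
              = PySem.Chars.splitOn.go ['\n'] n rest [c] [] by
            simp [PySem.Chars.splitOn.go, List.isPrefixOf]
            exact fun h => absurd h.symm hc]
        rw [ih rest (c :: cur) acc, ih rest [c] []]
        simp

theorem pv_splitOn_cons_nl (rest : List Char) :
    PySem.Chars.splitOn ('\n' :: rest) ['\n'] = [] :: PySem.Chars.splitOn rest ['\n'] := by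
  show PySem.Chars.splitOn.go ['\n'] (rest.length + 1 + 1) ('\n'::rest) [] [] = _
  rw [show PySem.Chars.splitOn.go ['\n'] (rest.length + 1 + 1) ('\n'::rest) [] []
        = PySem.Chars.splitOn.go ['\n'] (rest.length + 1) rest [] [[]] by
      simp [PySem.Chars.splitOn.go, List.isPrefixOf]]
  rw [pv_go_acc]
  rw [show PySem.Chars.splitOn rest ['\n'] = PySem.Chars.splitOn.go ['\n'] (rest.length + 1) rest [] [] from rfl]
  rw [pv_go_acc (rest.length+1) rest [] []]
  simp

theorem pv_splitOn_cons (c : Char) (rest : List Char) (h : c ≠ '\n') :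
    PySem.Chars.splitOn (c :: rest) ['\n']
      = (c :: (PySem.Chars.splitOn rest ['\n']).headD []) :: (PySem.Chars.splitOn rest ['\n']).tail := by
  show PySem.Chars.splitOn.go ['\n'] (rest.length + 1 + 1) (c::rest) [] [] = _
  rw [show PySem.Chars.splitOn.go ['\n'] (rest.length + 1 + 1) (c::rest) [] []
        = PySem.Chars.splitOn.go ['\n'] (rest.length + 1) rest [c] [] by
      simp [PySem.Chars.splitOn.go, List.isPrefixOf]
      exact fun hh => absurd hh.symm h]
  rw [pv_go_acc]
  rw [show PySem.Chars.splitOn rest ['\n'] = PySem.Chars.splitOn.go ['\n'] (rest.length + 1) rest [] [] from rfl]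
  rw [pv_go_acc (rest.length+1) rest [] []]
  simp

theorem pv_splitOn_eq_cons (l : List Char) :
    PySem.Chars.splitOn l ['\n']
      = (PySem.Chars.splitOn l ['\n']).headD [] :: (PySem.Chars.splitOn l ['\n']).tail := by
  show PySem.Chars.splitOn.go ['\n'] (l.length + 1) l [] [] = _
  rw [pv_go_acc (l.length+1) l [] []]
  simp [PySem.Chars.splitOn]

theorem pv_splitOn_nil : PySem.Chars.splitOn [] ['\n'] = [[]] := by decide

theorem pv_splitOn_len (l : List Char) :
    (PySem.Chars.splitOn l ['\n']).length > 1 ↔ '\n' ∈ l := by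
  induction l with
  | nil => simp [pv_splitOn_nil]
  | cons c rest ih =>
    by_cases hc : c = '\n'
    · subst hc
      rw [pv_splitOn_cons_nl]
      have h2 := pv_splitOn_eq_cons rest
      simp [List.length_cons]
      rw [h2]; simp
    · rw [pv_splitOn_cons c rest hc, List.mem_cons]
      have h2 := pv_splitOn_eq_cons rest
      have hl : (PySem.Chars.splitOn rest ['\n']).length
          = (PySem.Chars.splitOn rest ['\n']).tail.length + 1 := by
        conv_lhs => rw [h2]
        simp
      constructor
      · intro h
        refine Or.inr (ih.mp ?_)
        rw [List.length_cons] at h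
        omega
      · intro h
        rcases h with h | h
        · exact absurd h.symm hc
        · have h3 := ih.mpr h
          rw [List.length_cons]
          omega

theorem pv_joinQ (l : List Char) :
    ((PySem.Chars.splitOn l ['\n']).map (· ++ ['\n'])).flatten = l ++ ['\n'] := by
  induction l with
  | nil => simp [pv_splitOn_nil]
  | cons c rest ih =>
    by_cases hc : c = '\n'
    · subst hc
      rw [pv_splitOn_cons_nl]
      simp [ih]
    · rw [pv_splitOn_cons c rest hc]
      rw [pv_splitOn_eq_cons rest] at ih
      simp at ih ⊢
      simp [ih]

theorem pv_joinP (l : List Char) (h : '\n' ∈ l) :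
    (((PySem.Chars.splitOn l ['\n']).drop 1).map (· ++ ['\n'])).flatten
      = l.drop (l.idxOf '\n' + 1) ++ ['\n'] := by
  induction l with
  | nil => simp at h
  | cons c rest ih =>
    by_cases hc : c = '\n'
    · subst hc
      rw [pv_splitOn_cons_nl]
      simp [List.idxOf_cons_self, pv_joinQ rest]
    · rw [pv_splitOn_cons c rest hc]
      have hm : '\n' ∈ rest := by
        rcases List.mem_cons.mp h with h' | h'
        · exact absurd h'.symm hc
        · exact h'
      rw [List.idxOf_cons_ne _ (fun hh => hc hh)]
      have ih' := ih hm
      rw [pv_splitOn_eq_cons rest] at ih'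
      simp only [List.drop_succ_cons, List.drop_zero] at ih' ⊢
      exact ih'

theorem pv_find_go (l : List Char) : ∀ (k : Nat),
    PySem.Chars.find.go ['\n'] l k = if '\n' ∈ l then ((k + l.idxOf '\n' : Nat) : Int) else -1 := by
  induction l with
  | nil => intro k; simp [PySem.Chars.find.go]
  | cons c rest ih =>
    intro k
    by_cases hc : c = '\n'
    · subst hc
      simp [PySem.Chars.find.go, List.isPrefixOf, List.idxOf_cons_self]
    · rw [show PySem.Chars.find.go ['\n'] (c :: rest) k = PySem.Chars.find.go ['\n'] rest (k + 1) by
        simp [PySem.Chars.find.go, List.isPrefixOf]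
        exact fun hh => absurd hh.symm hc]
      rw [ih (k + 1), List.idxOf_cons_ne _ (fun hh => hc hh)]
      by_cases hm : '\n' ∈ rest
      · simp [hm, List.mem_cons.mpr (Or.inr hm)]
        omega
      · have : ¬ '\n' ∈ c :: rest := by
          intro hx; rcases List.mem_cons.mp hx with h' | h'
          · exact absurd h'.symm hc
          · exact hm h'
        simp [hm, this]

theorem pv_find_char (l : List Char) :
    PySem.Chars.find l ['\n'] = if '\n' ∈ l then (l.idxOf '\n' : Int) else -1 := by
  rw [show PySem.Chars.find l ['\n'] = PySem.Chars.find.go ['\n'] l 0 from rfl, pv_find_go l 0]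
  simp

theorem pv_pyRange_shift (n : Nat) : ∀ (a b : Int), b - a = n →
    (PySem.List.pyRange a b 1).map (· + 1) = PySem.List.pyRange (a + 1) (b + 1) 1 := by
  induction n with
  | zero =>
    intro a b h
    rw [PySem.List.pyRange_one_eq_nil (by omega), PySem.List.pyRange_one_eq_nil (by omega)]
    simp
  | succ m ih =>
    intro a b h
    rw [PySem.List.pyRange_one_cons (by omega), PySem.List.pyRange_one_cons (show a + 1 < b + 1 by omega)]
    simp only [List.map_cons]
    rw [ih (a + 1) b (by omega)]

theorem pv_fold_flatten (ys : List (List Char)) : ∀ (init : List Char),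
    ys.foldl (fun acc line => acc ++ line ++ ['\n']) init
      = init ++ (ys.map (· ++ ['\n'])).flatten := by
  induction ys with
  | nil => intro init; simp
  | cons y t ih =>
    intro init
    simp only [List.foldl_cons, List.map_cons, List.flatten_cons]
    rw [ih]
    simp

theorem pv_loop_eq (xs : List (List Char)) (hx : xs ≠ []) :
    (PySem.List.pyRange 0 ((xs.length : Int) - 1) 1).foldl
        (fun acc i => acc ++ PySem.List.pyGetD xs (i + 1) [] ++ ['\n']) []
      = ((xs.drop 1).map (· ++ ['\n'])).flatten := by
  have hpos : 0 < xs.length := List.length_pos_iff.mpr hx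
  have hshift := pv_pyRange_shift (xs.length - 1) 0 ((xs.length : Int) - 1) (by omega)
  rw [← List.foldl_map (f := (· + 1 : Int → Int))
    (g := fun acc j => acc ++ PySem.List.pyGetD xs j [] ++ ['\n'])]
  rw [hshift]
  rw [show (0 : Int) + 1 = 1 from rfl, show (xs.length : Int) - 1 + 1 = (xs.length : Int) by ring]
  rw [PySem.List.foldl_pyRange_pyGetD' xs [] (fun acc line => acc ++ line ++ ['\n']) [] (by omega)]
  rw [pv_fold_flatten]
  simp

theorem pv_main (desc : Option String) : getLongDesc desc = getLongDesc_alt desc := by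
  cases desc with
  | none => rfl
  | some s =>
    show (if s.toList ≠ [] then _ else "") = (if s.toList ≠ [] then _ else "")
    by_cases hs : s.toList = []
    · simp [hs]
    · simp only [ne_eq, hs, not_false_eq_true, if_true]
      rw [pv_find_char s.toList]
      by_cases hm : '\n' ∈ s.toList
      · have hlen := (pv_splitOn_len s.toList).mpr hm
        rw [if_pos hlen]
        have hne : PySem.Chars.splitOn s.toList ['\n'] ≠ [] := by
          rw [pv_splitOn_eq_cons s.toList]; simp
        rw [pv_loop_eq _ hne]
        have h1 : (((PySem.Chars.splitOn s.toList ['\n']).drop 1).map (· ++ ['\n'])).flatten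
            = s.toList.drop (s.toList.idxOf '\n' + 1) ++ ['\n'] := pv_joinP s.toList hm
        rw [h1]
        rw [if_pos hm]
        rw [if_neg (show ¬((s.toList.idxOf '\n' : Int) = -1) by omega)]
        congr 1
        rw [PySem.Chars.slice_eq_listSlice,
          PySem.List.slice_from s.toList (show (0:Int) ≤ (s.toList.idxOf '\n' : Int) + 1 by omega)]
        congr 2
      · have hlen := pv_splitOn_len s.toList
        rw [if_neg (by rw [hlen]; exact hm), if_pos (by rw [if_neg hm])]

-- ===== VERDICT (by name: the statement is the Claim_ definition above) =====
theorem getLongDesc_spec : Claim_equal_getLongDesc := by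
  intro desc _
  unfold Spec_getLongDesc
  exact pv_main desc
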